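-- pv_equiv track=rewrite | github.com/vicruz99/ShinkaEvolve | examples/julia_prime_counting/evaluate.py | _prime_count_prefix
-- ===== SOURCE A (Python) =====
-- def _prime_count_prefix(max_n: int) -> list[int]:
--     if max_n < 1:
--         return [0]
--
--     is_prime = [True] * (max_n + 1)
--     is_prime[0] = False
--     if max_n >= 1:
--         is_prime[1] = False
--
--     p = 2
--     while p * p <= max_n:
--         if is_prime[p]:
--             multiple = p * p
--             while multiple <= max_n:
--                 is_prime[multiple] = False
--                 multiple += p
--         p += 1
--
--     prefix = [0] * (max_n + 1)
--     running = 0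
--     for n in range(max_n + 1):
--         if is_prime[n]:
--             running += 1
--         prefix[n] = running
--     return prefix
-- ===== SOURCE B (Python) =====
-- def _prime_count_prefix(max_n: int) -> list[int]:
--     if max_n < 1:
--         return [0]
--
--     def is_prime(n: int) -> bool:
--         if n < 2:
--             return False
--         d = 2
--         while d * d <= n:
--             if n % d == 0:
--                 return False
--             d += 1
--         return True
--
--     result = []
--     running = 0
--     for n in range(max_n + 1):
--         if is_prime(n):
--             running += 1
--         result.append(running)
--     return result
-- ===== Notes on version B (the rewrite author's own statement) =====
-- stated objective: simpler
-- what changed: Replaces the Sieve of Eratosthenes boolean array plus separate prefix pass with a single loop that tests each number by trial division (d while d*d<=n) and appends a running count.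
import Mathlib
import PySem

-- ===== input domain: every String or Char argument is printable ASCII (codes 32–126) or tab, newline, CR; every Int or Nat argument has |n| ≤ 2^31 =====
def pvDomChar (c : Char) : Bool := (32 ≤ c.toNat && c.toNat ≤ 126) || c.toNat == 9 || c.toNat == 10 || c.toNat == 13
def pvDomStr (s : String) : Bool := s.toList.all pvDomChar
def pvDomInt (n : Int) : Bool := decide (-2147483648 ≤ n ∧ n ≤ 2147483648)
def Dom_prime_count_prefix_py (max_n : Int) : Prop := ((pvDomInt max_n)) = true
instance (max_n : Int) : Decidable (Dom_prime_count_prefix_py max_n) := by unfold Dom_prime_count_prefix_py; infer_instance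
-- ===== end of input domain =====

-- B replaces A's Sieve-of-Eratosthenes array plus separate prefix pass with one loop doing
-- trial division per number and appending a running count: simpler, not faster.


-- ===== PORT A =====
-- inner while: while multiple <= max_n: is_prime[multiple] = False; multiple += p
-- (the '0 < p' conjunct only makes the recursion total; every call has p ≥ 2)
def pySieveMark (max_n p mult : Int) (arr : List Bool) : List Bool :=
  if _h : mult ≤ max_n ∧ 0 < p then
    pySieveMark max_n p (mult + p) (arr.set mult.toNat false)
  else arr
termination_by (max_n + 1 - mult).toNat
decreasing_by omega

-- outer while: while p * p <= max_n: …; p += 1   ('0 < p' again only for totality)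
def pySieveLoop (max_n p : Int) (arr : List Bool) : List Bool :=
  if _h : p * p ≤ max_n ∧ 0 < p then
    pySieveLoop max_n (p + 1)
      (if arr.getD p.toNat false then pySieveMark max_n p (p * p) arr else arr)
  else arr
termination_by (max_n + 1 - p).toNat
decreasing_by
  have hp : p ≤ p * p := by nlinarith [_h.2]
  omega

def prime_count_prefix_py (max_n : Int) : List Int :=
  if max_n < 1 then [0]
  else
    let is0 := List.replicate (max_n + 1).toNat true
    let is1 := is0.set 0 false
    let is2 := if max_n ≥ 1 then is1.set 1 false else is1
    let isp := pySieveLoop max_n 2 is2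
    ((PySem.List.pyRange 0 (max_n + 1) 1).foldl
      (fun (st : Int × List Int) n =>
        let running := if isp.getD n.toNat false then st.1 + 1 else st.1
        (running, st.2.set n.toNat running))
      (0, List.replicate (max_n + 1).toNat (0 : Int))).2

-- ===== PORT B =====
-- while d * d <= n: if n % d == 0: return False; d += 1   ('0 < d' only for totality)
def altTrial (n d : Int) : Bool :=
  if _h : d * d ≤ n ∧ 0 < d then
    if PySem.Int.mod n d = 0 then false else altTrial n (d + 1)
  else true
termination_by (n + 1 - d).toNat
decreasing_by
  have hd : d ≤ d * d := by nlinarith [_h.2]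
  omega

def altIsPrime (n : Int) : Bool := if n < 2 then false else altTrial n 2

def prime_count_prefix_py_alt (max_n : Int) : List Int :=
  if max_n < 1 then [0]
  else
    ((PySem.List.pyRange 0 (max_n + 1) 1).foldl
      (fun (st : Int × List Int) n =>
        let running := if altIsPrime n then st.1 + 1 else st.1
        (running, st.2 ++ [running]))
      (0, ([] : List Int))).2

-- ===== PRECONDITION & SPEC =====
def Spec_prime_count_prefix_py (max_n : Int) (out : List Int) : Prop := out = prime_count_prefix_py_alt max_n
instance (max_n : Int) (out : List Int) : Decidable (Spec_prime_count_prefix_py max_n out) := by unfold Spec_prime_count_prefix_py; infer_instance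

-- ===== CLAIM (what is proved, stated in full; the proofs are below) =====
def Claim_equal_prime_count_prefix_py : Prop := ∀ (max_n : Int), Dom_prime_count_prefix_py max_n → Spec_prime_count_prefix_py max_n (prime_count_prefix_py max_n)

-- ===== LEMMAS AND PROOFS =====

-- the common characterisation both programs compute: n ≥ 2 with no divisor d, 2 ≤ d, d² ≤ n
def PvQ (n : Int) : Prop := 2 ≤ n ∧ ∀ d : Int, 2 ≤ d → d * d ≤ n → ¬ d ∣ n

-- B side: trial-division loop correctness
lemma altTrial_iff (n : Int) : ∀ (d : Int), 2 ≤ d →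
    (altTrial n d = true ↔ ∀ e : Int, d ≤ e → e * e ≤ n → ¬ e ∣ n) := by
  suffices H : ∀ (k : Nat) (d : Int), (n + 1 - d).toNat = k → 2 ≤ d →
      (altTrial n d = true ↔ ∀ e : Int, d ≤ e → e * e ≤ n → ¬ e ∣ n) by
    intro d hd; exact H _ d rfl hd
  intro k
  induction k using Nat.strong_induction_on with
  | _ k IH =>
    intro d hk hd
    rw [altTrial]
    by_cases hlt : d * d ≤ n
    · have hdpos : (0:Int) < d := by omega
      rw [dif_pos ⟨hlt, hdpos⟩]
      by_cases hdvd : PySem.Int.mod n d = 0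
      · rw [if_pos hdvd]
        simp only [Bool.false_eq_true, false_iff]
        intro hall
        exact hall d le_rfl hlt ((PySem.Int.mod_eq_zero_iff_dvd n d).mp hdvd)
      · rw [if_neg hdvd]
        rw [IH (n + 1 - (d + 1)).toNat (by have hdd : d ≤ d * d := le_mul_of_one_le_left (by omega) (by omega); omega) (d + 1) rfl (by omega)]
        constructor
        · intro hall e hde hen hdvd'
          rcases eq_or_lt_of_le hde with rfl | hlt'
          · exact hdvd ((PySem.Int.mod_eq_zero_iff_dvd _ _).mpr hdvd')
          · exact hall e (by omega) hen hdvd'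
        · intro hall e hde hen; exact hall e (by omega) hen
    · rw [dif_neg (by tauto)]
      simp only [true_iff]
      intro e hde hen _
      have : d * d ≤ e * e := mul_le_mul hde hde (by omega) (by omega)
      omega

lemma altIsPrime_iff (n : Int) : altIsPrime n = true ↔ PvQ n := by
  unfold altIsPrime PvQ
  by_cases h2 : n < 2
  · rw [if_pos h2]; simp only [Bool.false_eq_true, false_iff]; omega
  · rw [if_neg h2, altTrial_iff n 2 le_rfl]
    constructor
    · intro hall; exact ⟨by omega, fun d hd => hall d hd⟩
    · intro ⟨_, hall⟩ e he; exact hall e he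

-- A side: inner marking loop
lemma pySieveMark_length (max_n p : Int) : ∀ (mult : Int) (arr : List Bool),
    (pySieveMark max_n p mult arr).length = arr.length := by
  suffices H : ∀ (k : Nat) (mult : Int) (arr : List Bool), (max_n + 1 - mult).toNat = k →
      (pySieveMark max_n p mult arr).length = arr.length by
    intro mult arr; exact H _ mult arr rfl
  intro k
  induction k using Nat.strong_induction_on with
  | _ k IH =>
    intro mult arr hk
    rw [pySieveMark]
    split
    · rename_i h
      rw [IH (max_n + 1 - (mult + p)).toNat (by omega) (mult + p) _ rfl]
      simp
    · rfl

lemma pySieveMark_getD (max_n p : Int) (hp : 0 < p) : ∀ (mult : Int) (arr : List Bool),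
    0 ≤ mult → arr.length = (max_n + 1).toNat →
    ∀ i : Int, 0 ≤ i → i ≤ max_n →
    (pySieveMark max_n p mult arr).getD i.toNat false
      = (arr.getD i.toNat false && !decide (mult ≤ i ∧ p ∣ (i - mult))) := by
  suffices H : ∀ (k : Nat) (mult : Int) (arr : List Bool), (max_n + 1 - mult).toNat = k →
      0 ≤ mult → arr.length = (max_n + 1).toNat →
      ∀ i : Int, 0 ≤ i → i ≤ max_n →
      (pySieveMark max_n p mult arr).getD i.toNat false
        = (arr.getD i.toNat false && !decide (mult ≤ i ∧ p ∣ (i - mult))) by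
    intro mult arr h0 hlen; exact H _ mult arr rfl h0 hlen
  intro k
  induction k using Nat.strong_induction_on with
  | _ k IH =>
    intro mult arr hk h0 hlen i hi0 hiM
    rw [pySieveMark]
    by_cases hm : mult ≤ max_n
    · rw [dif_pos ⟨hm, hp⟩]
      rw [IH (max_n + 1 - (mult + p)).toNat (by omega) (mult + p) _ (by omega) (by omega)
            (by simp [hlen]) i hi0 hiM]
      by_cases hie : i = mult
      · subst hie
        have hlt : i.toNat < arr.length := by omega
        have h1 : (arr.set i.toNat false).getD i.toNat false = false := by
          simp [List.getD_eq_getElem?_getD, hlt]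
        rw [h1]
        simp
      · have hne : i.toNat ≠ mult.toNat := by omega
        have h1 : (arr.set mult.toNat false).getD i.toNat false = arr.getD i.toNat false := by
          simp [List.getD_eq_getElem?_getD, Ne.symm hne]
        rw [h1]
        have h2 : (mult + p ≤ i ∧ p ∣ (i - (mult + p))) ↔ (mult ≤ i ∧ p ∣ (i - mult)) := by
          constructor
          · rintro ⟨hle, hdvd⟩
            refine ⟨by omega, ?_⟩
            have : i - mult = (i - (mult + p)) + p := by ring
            rw [this]; exact dvd_add hdvd dvd_rfl
          · rintro ⟨hle, hdvd⟩
            have hgt : 0 < i - mult := by omega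
            have hple : p ≤ i - mult := Int.le_of_dvd hgt hdvd
            refine ⟨by omega, ?_⟩
            have : i - (mult + p) = (i - mult) - p := by ring
            rw [this]; exact dvd_sub hdvd dvd_rfl
        simp only [decide_eq_decide.mpr h2]
    · rw [dif_neg (by tauto)]
      have h3 : ¬ (mult ≤ i ∧ p ∣ (i - mult)) := by rintro ⟨h1, _⟩; omega
      simp [h3]

-- A side: outer loop invariant
lemma pySieveLoop_getD (max_n : Int) : ∀ (p : Int) (arr : List Bool), 2 ≤ p →
    arr.length = (max_n + 1).toNat →
    (∀ i : Int, 0 ≤ i → i ≤ max_n →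
      (arr.getD i.toNat false = true ↔
        (2 ≤ i ∧ ∀ d : Int, 2 ≤ d → d < p → d * d ≤ i → ¬ d ∣ i))) →
    ∀ i : Int, 0 ≤ i → i ≤ max_n →
    ((pySieveLoop max_n p arr).getD i.toNat false = true ↔ PvQ i) := by
  suffices H : ∀ (k : Nat) (p : Int) (arr : List Bool), (max_n + 1 - p).toNat = k → 2 ≤ p →
      arr.length = (max_n + 1).toNat →
      (∀ i : Int, 0 ≤ i → i ≤ max_n →
        (arr.getD i.toNat false = true ↔
          (2 ≤ i ∧ ∀ d : Int, 2 ≤ d → d < p → d * d ≤ i → ¬ d ∣ i))) →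
      ∀ i : Int, 0 ≤ i → i ≤ max_n →
      ((pySieveLoop max_n p arr).getD i.toNat false = true ↔ PvQ i) by
    intro p arr hp hlen hinv; exact H _ p arr rfl hp hlen hinv
  intro k
  induction k using Nat.strong_induction_on with
  | _ k IH =>
    intro p arr hk hp hlen hinv i hi0 hiM
    rw [pySieveLoop]
    by_cases hpp : p * p ≤ max_n
    · have hple : p ≤ p * p := le_mul_of_one_le_left (by omega) (by omega)
      rw [dif_pos ⟨hpp, by omega⟩]
      by_cases hb : arr.getD p.toNat false = true
      · rw [if_pos hb]
        have hdvd_iff : ∀ j : Int, (p ∣ j - p * p ↔ p ∣ j) := by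
          intro j
          constructor
          · intro h
            have : j = (j - p * p) + p * p := by ring
            rw [this]; exact dvd_add h (Dvd.intro p rfl)
          · intro h
            exact dvd_sub h (Dvd.intro p rfl)
        have hinv' : ∀ j : Int, 0 ≤ j → j ≤ max_n →
            ((pySieveMark max_n p (p * p) arr).getD j.toNat false = true ↔
              (2 ≤ j ∧ ∀ d : Int, 2 ≤ d → d < p + 1 → d * d ≤ j → ¬ d ∣ j)) := by
          intro j hj0 hjM
          rw [pySieveMark_getD max_n p (by omega) (p * p) arr (by nlinarith) hlen j hj0 hjM]
          rw [Bool.and_eq_true, hinv j hj0 hjM, Bool.not_eq_true', decide_eq_false_iff_not]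
          constructor
          · rintro ⟨⟨hj2, hall⟩, hnp⟩
            refine ⟨hj2, fun d hd2 hdp1 hdd hddvd => ?_⟩
            have hcase : d < p ∨ d = p := by omega
            rcases hcase with hcase | hcase
            · exact hall d hd2 hcase hdd hddvd
            · subst hcase
              exact hnp ⟨hdd, (hdvd_iff j).mpr hddvd⟩
          · rintro ⟨hj2, hall⟩
            refine ⟨⟨hj2, fun d hd2 hdp hdd hddvd => hall d hd2 (by omega) hdd hddvd⟩, ?_⟩
            rintro ⟨hpj, hpd⟩
            exact hall p hp (by omega) hpj ((hdvd_iff j).mp hpd)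
        exact IH (max_n + 1 - (p + 1)).toNat (by omega) (p + 1) _ rfl (by omega)
          (by rw [pySieveMark_length]; exact hlen) hinv' i hi0 hiM
      · rw [if_neg hb]
        have hpM : p ≤ max_n := by omega
        have hcomp := hinv p (by omega) hpM
        have hB : ¬ (2 ≤ p ∧ ∀ d : Int, 2 ≤ d → d < p → d * d ≤ p → ¬ d ∣ p) :=
          fun hq => hb (hcomp.mpr hq)
        have hB' : ¬ ∀ d : Int, 2 ≤ d → d < p → d * d ≤ p → ¬ d ∣ p := by tauto
        push Not at hB'
        obtain ⟨d0, hd02, hd0lt, hd0sq, hd0dvd⟩ := hB'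
        have hinv' : ∀ j : Int, 0 ≤ j → j ≤ max_n →
            (arr.getD j.toNat false = true ↔
              (2 ≤ j ∧ ∀ d : Int, 2 ≤ d → d < p + 1 → d * d ≤ j → ¬ d ∣ j)) := by
          intro j hj0 hjM
          rw [hinv j hj0 hjM]
          constructor
          · rintro ⟨hj2, hall⟩
            refine ⟨hj2, fun d hd2 hdp1 hdd hddvd => ?_⟩
            have hcase : d < p ∨ d = p := by omega
            rcases hcase with hcase | hcase
            · exact hall d hd2 hcase hdd hddvd
            · subst hcase
              exact hall d0 hd02 hd0lt (by omega) (dvd_trans hd0dvd hddvd)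
          · rintro ⟨hj2, hall⟩
            exact ⟨hj2, fun d hd2 hdp hdd hddvd => hall d hd2 (by omega) hdd hddvd⟩
        exact IH (max_n + 1 - (p + 1)).toNat (by omega) (p + 1) arr rfl (by omega) hlen hinv' i hi0 hiM
    · rw [dif_neg (by tauto)]
      rw [hinv i hi0 hiM]
      unfold PvQ
      constructor
      · rintro ⟨hi2, hall⟩
        refine ⟨hi2, fun d hd2 hdd => hall d hd2 ?_ hdd⟩
        by_contra hnd
        push Not at hnd
        have : p * p ≤ d * d := mul_le_mul hnd hnd (by omega) (by omega)
        omega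
      · rintro ⟨hi2, hall⟩
        exact ⟨hi2, fun d hd2 _ hdd => hall d hd2 hdd⟩

-- the two prefix loops agree when the primality bits agree on the range
lemma fold_set_eq_fold_append (prA prB : Int → Bool) : ∀ (k : Nat) (m r : Int) (accB : List Int),
    0 ≤ m → accB.length = m.toNat →
    (∀ n : Int, m ≤ n → n < m + k → prA n = prB n) →
    (PySem.List.pyRange m (m + k) 1).foldl
      (fun (st : Int × List Int) n =>
        let running := if prA n then st.1 + 1 else st.1
        (running, st.2.set n.toNat running))
      (r, accB ++ List.replicate k 0)
    = (PySem.List.pyRange m (m + k) 1).foldl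
      (fun (st : Int × List Int) n =>
        let running := if prB n then st.1 + 1 else st.1
        (running, st.2 ++ [running]))
      (r, accB) := by
  intro k
  induction k with
  | zero =>
    intro m r accB hm hlen hpr
    rw [PySem.List.pyRange_one_eq_nil (by omega)]
    simp
  | succ k ih =>
    intro m r accB hm hlen hpr
    rw [PySem.List.pyRange_one_cons (by push_cast; omega)]
    simp only [List.foldl_cons]
    have hpm : prA m = prB m := hpr m le_rfl (by push_cast; omega)
    have hset : (accB ++ List.replicate (k + 1) (0 : Int)).set m.toNat
        (if prA m then r + 1 else r)
        = (accB ++ [if prA m then r + 1 else r]) ++ List.replicate k (0 : Int) := by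
      rw [List.replicate_succ, List.set_append, if_neg (by omega), hlen]
      simp
    show (PySem.List.pyRange (m + 1) (m + (↑(k + 1) : Int)) 1).foldl _
        ((if prA m then r + 1 else r), (accB ++ List.replicate (k + 1) (0:Int)).set m.toNat (if prA m then r + 1 else r))
      = (PySem.List.pyRange (m + 1) (m + (↑(k + 1) : Int)) 1).foldl _
        ((if prB m then r + 1 else r), accB ++ [if prB m then r + 1 else r])
    rw [hset, hpm]
    have hrange : m + (↑(k + 1) : Int) = (m + 1) + (↑k : Int) := by push_cast; ring
    rw [hrange]
    exact ih (m + 1) (if prB m then r + 1 else r) (accB ++ [if prB m then r + 1 else r])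
      (by omega) (by simp [hlen]; omega)
      (fun n h1 h2 => hpr n (by omega) (by push_cast at h2 ⊢; omega))

-- ===== VERDICT (by name: the statement is the Claim_ definition above) =====
theorem prime_count_prefix_py_spec : Claim_equal_prime_count_prefix_py := by
  intro max_n _dom
  unfold Spec_prime_count_prefix_py prime_count_prefix_py prime_count_prefix_py_alt
  by_cases h1 : max_n < 1
  · rw [if_pos h1, if_pos h1]
  · rw [if_neg h1, if_neg h1]
    have hge : 1 ≤ max_n := by omega
    simp only [ge_iff_le, hge, if_true]
    have hL : (0 : Int) + (((max_n + 1).toNat : Nat) : Int) = max_n + 1 := by omega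
    have hlen2 : (((List.replicate (max_n + 1).toNat true).set 0 false).set 1 false).length
        = (max_n + 1).toNat := by simp
    have hinv : ∀ i : Int, 0 ≤ i → i ≤ max_n →
        ((((List.replicate (max_n + 1).toNat true).set 0 false).set 1 false).getD i.toNat false = true ↔
          (2 ≤ i ∧ ∀ d : Int, 2 ≤ d → d < 2 → d * d ≤ i → ¬ d ∣ i)) := by
      intro i hi0 hiM
      have hilt : i.toNat < (max_n + 1).toNat := by omega
      by_cases hi2 : 2 ≤ i
      · have hne0 : i.toNat ≠ 0 := by omega
        have hne1 : i.toNat ≠ 1 := by omega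
        simp [List.getD_eq_getElem?_getD, hilt, Ne.symm hne0, Ne.symm hne1, hi2]
        intro d hd2 hdlt; omega
      · have hcase : i.toNat = 0 ∨ i.toNat = 1 := by omega
        have h2len : 1 < (max_n + 1).toNat := by omega
        rcases hcase with hc | hc <;>
          simp [List.getD_eq_getElem?_getD, hc, h2len, hi2, show (0:Int) ≤ max_n by omega]
    have hbits : ∀ n : Int, 0 ≤ n → n < 0 + (((max_n + 1).toNat : Nat) : Int) →
        ((pySieveLoop max_n 2 (((List.replicate (max_n + 1).toNat true).set 0 false).set 1 false)).getD n.toNat false)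
          = altIsPrime n := by
      intro n h0 h1'
      rw [hL] at h1'
      have hA := pySieveLoop_getD max_n 2 _ le_rfl hlen2 hinv n h0 (by omega)
      have hB := altIsPrime_iff n
      by_cases hq : PvQ n
      · rw [hA.mpr hq, hB.mpr hq]
      · have e1 : (pySieveLoop max_n 2 (((List.replicate (max_n + 1).toNat true).set 0 false).set 1 false)).getD n.toNat false = false := by
          rw [← Bool.not_eq_true]; exact fun h => hq (hA.mp h)
        have e2 : altIsPrime n = false := by
          rw [← Bool.not_eq_true]; exact fun h => hq (hB.mp h)
        rw [e1, e2]
    have hfold := fold_set_eq_fold_append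
      (fun n => (pySieveLoop max_n 2 (((List.replicate (max_n + 1).toNat true).set 0 false).set 1 false)).getD n.toNat false)
      altIsPrime (max_n + 1).toNat 0 0 [] le_rfl rfl hbits
    rw [hL] at hfold
    simp only [List.nil_append] at hfold
    exact congrArg Prod.snd hfold
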